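-- pv_equiv track=rewrite | github.com/TdotA/Python_for_CS1 | MyScripts/decreasinf_fcn.py | is_nondecreasing
-- ===== SOURCE A (Python) =====
-- def is_nondecreasing(s):
--     first = s[0]
--     rest = s[1:]
--     if len(rest) == 0:
--         return True
--     if first > rest[0]:
--         return False
--     return is_nondecreasing(rest)
-- ===== SOURCE B (Python) =====
-- def is_nondecreasing(s):
--     return all(x <= y for x, y in zip(s, s[1:]))
-- ===== Notes on version B (the rewrite author's own statement) =====
-- stated objective: faster
-- what changed: Replaced A's recursion that re-slices the tail at every step (O(n^2) copying, and recursion-depth bound) with a single linear pass comparing adjacent elements via zip.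
-- crash fix: A raises IndexError on the empty list (s[0]); B returns True there, the natural value for a vacuously nondecreasing sequence. — e.g. on is_nondecreasing([]): A raises IndexError, B returns true
import Mathlib
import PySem

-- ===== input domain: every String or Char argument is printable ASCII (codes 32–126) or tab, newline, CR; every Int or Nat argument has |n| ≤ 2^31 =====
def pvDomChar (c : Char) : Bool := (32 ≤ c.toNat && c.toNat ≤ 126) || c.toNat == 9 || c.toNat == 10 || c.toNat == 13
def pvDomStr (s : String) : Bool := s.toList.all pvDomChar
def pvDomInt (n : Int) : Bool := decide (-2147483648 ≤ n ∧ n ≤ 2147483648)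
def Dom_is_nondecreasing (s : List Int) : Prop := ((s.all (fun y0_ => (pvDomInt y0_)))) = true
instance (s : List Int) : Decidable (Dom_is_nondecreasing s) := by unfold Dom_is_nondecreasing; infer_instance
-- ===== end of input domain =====

-- B replaces A's recursion with repeated tail slicing (O(n^2) copying) by one linear zip pass over adjacent pairs.


-- ===== PORT A =====
-- A: first = s[0]; rest = s[1:]; empty rest → True; first > rest[0] → False; else recurse on rest.
-- On the empty list Python raises IndexError (s[0]); that input is outside Pre_ (the [] branch value is irrelevant).
def is_nondecreasing (s : List Int) : Bool :=
  match s with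
  | [] => false
  | first :: rest =>
    match rest with
    | [] => true
    | r0 :: _ => if first > r0 then false else is_nondecreasing rest

-- ===== PORT B =====
-- B: all(x <= y for x, y in zip(s, s[1:]))
def is_nondecreasing_alt (s : List Int) : Bool :=
  (s.zip (PySem.List.slice s (some 1) none)).all (fun p => p.1 ≤ p.2)

-- ===== PRECONDITION & SPEC =====
-- Pre_ excludes the empty list, on which A raises IndexError.
def Pre_is_nondecreasing (s : List Int) : Prop := s ≠ []
instance (s : List Int) : Decidable (Pre_is_nondecreasing s) := by unfold Pre_is_nondecreasing; infer_instance
def pvWitness_is_nondecreasing : List Int := [1, 2, 2]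

-- A raises IndexError on the empty list; B returns True there (a vacuously nondecreasing sequence).
def Raises_is_nondecreasing (s : List Int) : Prop := s = []
instance (s : List Int) : Decidable (Raises_is_nondecreasing s) := by unfold Raises_is_nondecreasing; infer_instance
def pvRaiseWitness_is_nondecreasing : List Int := []
def pvRaiseWitnessOut_is_nondecreasing : Bool := true

def Spec_is_nondecreasing (s : List Int) (out : Bool) : Prop := out = is_nondecreasing_alt s
instance (s : List Int) (out : Bool) : Decidable (Spec_is_nondecreasing s out) := by unfold Spec_is_nondecreasing; infer_instance

-- ===== CLAIM =====
def Claim_equal_is_nondecreasing : Prop := ∀ (s : List Int), Dom_is_nondecreasing s → Pre_is_nondecreasing s → Spec_is_nondecreasing s (is_nondecreasing s)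
def Claim_raises_is_nondecreasing : Prop := (∀ (s : List Int), Dom_is_nondecreasing s → Raises_is_nondecreasing s → ¬ Pre_is_nondecreasing s) ∧ (Dom_is_nondecreasing (pvRaiseWitness_is_nondecreasing) ∧ Raises_is_nondecreasing (pvRaiseWitness_is_nondecreasing) ∧ is_nondecreasing_alt (pvRaiseWitness_is_nondecreasing) = pvRaiseWitnessOut_is_nondecreasing)

-- ===== LEMMAS AND PROOFS =====
lemma alt_cons (a b : Int) (t : List Int) :
    is_nondecreasing_alt (a :: b :: t) = ((a ≤ b) && is_nondecreasing_alt (b :: t)) := by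
  simp [is_nondecreasing_alt, PySem.List.slice_from_one]

lemma equiv_nonempty (s : List Int) (h : s ≠ []) :
    is_nondecreasing s = is_nondecreasing_alt s := by
  induction s with
  | nil => exact absurd rfl h
  | cons a t ih =>
    cases t with
    | nil => simp [is_nondecreasing, is_nondecreasing_alt, PySem.List.slice_from_one]
    | cons b u =>
      rw [alt_cons, ← ih (by simp)]
      by_cases hab : a > b
      · have : ¬ a ≤ b := by omega
        simp [is_nondecreasing, hab, this]
      · have : a ≤ b := by omega
        simp [is_nondecreasing, hab, this]

-- ===== VERDICT =====
theorem is_nondecreasing_spec : Claim_equal_is_nondecreasing := by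
  intro s _ hp
  unfold Spec_is_nondecreasing
  exact equiv_nonempty s hp

theorem is_nondecreasing_raises : Claim_raises_is_nondecreasing := by
  unfold Claim_raises_is_nondecreasing
  exact ⟨fun s _ hr hp => hp hr, by decide⟩

-- self-check: the port of B indeed returns the stated value at the raise witness
theorem pvRaiseWitnessOut_ok :
    is_nondecreasing_alt pvRaiseWitness_is_nondecreasing = pvRaiseWitnessOut_is_nondecreasing :=
  is_nondecreasing_raises.2.2.2
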